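-- pv_equiv track=rewrite | github.com/beheshtraya/CommitRisk | estimate_best_batch_size.py | get_num_of_runs
-- ===== SOURCE A (Python) =====
-- def get_num_of_runs(test_list, batch_size):
--     if batch_size == 1:
--         return len(test_list)
--     # if batch_size <= 4:
--     #     return len(test_list)
--
--     num_of_runs = 0
--
--     for i in range(0, len(test_list), batch_size):
--         if i + batch_size > len(test_list):
--             selected_portion = test_list[i:]
--         else:
--             selected_portion = test_list[i: i + batch_size]
--
--         num_of_runs += 1
--
--         if False in selected_portion:
--             num_of_runs += get_num_of_runs(selected_portion, int(batch_size / 2))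
--
--     return num_of_runs
-- ===== SOURCE B (Python) =====
-- def get_num_of_runs(test_list, batch_size):
--     # prefix counts of False give a constant-time "does this chunk contain False"
--     # check; recursion works on index ranges, never slicing the list.
--     if batch_size == 1:
--         return len(test_list)
--     if batch_size < 1:
--         return 0
--     pf = [0]
--     c = 0
--     for x in test_list:
--         c += (not x)
--         pf.append(c)
--
--     def count(lo, hi, bs):
--         if bs == 1:
--             return hi - lo
--         runs = 0
--         i = lo
--         while i < hi:
--             j = min(i + bs, hi)
--             runs += 1
--             if pf[j] - pf[i] > 0:
--                 runs += count(i, j, bs // 2)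
--             i = j
--         return runs
--
--     return count(0, len(test_list), batch_size)
-- ===== Notes on version B (the rewrite author's own statement) =====
-- stated objective: alternative
-- what changed: B precomputes a prefix-count-of-False table once and recurses on index ranges with a constant-time range-contains-False check, instead of A's repeated slicing and linear 'False in portion' scans at every recursion level; B avoids A's repeated copying but spends more time in interpreted per-chunk loops, so measured cost is about the same.
import Mathlib
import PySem

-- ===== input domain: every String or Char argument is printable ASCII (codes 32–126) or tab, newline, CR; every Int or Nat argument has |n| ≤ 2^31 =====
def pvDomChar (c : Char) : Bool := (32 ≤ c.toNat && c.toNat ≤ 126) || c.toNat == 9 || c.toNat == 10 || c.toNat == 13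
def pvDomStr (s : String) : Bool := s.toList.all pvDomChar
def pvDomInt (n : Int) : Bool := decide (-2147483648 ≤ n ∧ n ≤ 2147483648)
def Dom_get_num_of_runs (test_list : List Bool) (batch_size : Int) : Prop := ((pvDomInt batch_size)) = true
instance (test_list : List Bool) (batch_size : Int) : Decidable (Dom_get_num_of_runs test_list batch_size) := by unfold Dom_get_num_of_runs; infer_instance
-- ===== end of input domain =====

-- B replaces A's per-level slicing and linear 'False in portion' scans by a prefix-count-of-False
-- table with constant-time range checks and recursion on index ranges (objective: alternative).


-- ===== PORT A =====
-- Literal transliteration of A's recursion; the Nat fuel only makes the well-founded recursion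
-- explicit (batch_size halves at every recursive call, so bs.toNat + 1 never runs out).
def pvGoA : Nat → List Bool → Int → Int
  | 0, _, _ => 0
  | fuel+1, test_list, batch_size =>
    if batch_size = 1 then (test_list.length : Int)
    else
      (PySem.List.pyRange 0 (test_list.length : Int) batch_size).foldl
        (fun num_of_runs i =>
          let selected_portion :=
            if i + batch_size > (test_list.length : Int) then
              PySem.List.slice test_list (some i) none
            else
              PySem.List.slice test_list (some i) (some (i + batch_size))
          let num_of_runs := num_of_runs + 1
          if false ∈ selected_portion then
            num_of_runs + pvGoA fuel selected_portion (PySem.Int.truncdiv batch_size 2)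
          else
            num_of_runs) 0

def get_num_of_runs (test_list : List Bool) (batch_size : Int) : Int :=
  pvGoA (batch_size.toNat + 1) test_list batch_size

-- ===== PORT B =====
-- prefix counts of False: pf = [0] then running count after each element (Source B's for-loop)
def pvPrefixFalse : List Bool → Int → List Int
  | [], _ => []
  | x :: xs, c => let c' := c + (if x then 0 else 1); c' :: pvPrefixFalse xs c'

-- Source B's inner while-loop of `count` (fuel = number of remaining indices, enough for ≥1 step per chunk)
def pvLoopB (f : Int → Int → Int → Int) (pf : List Int) :
    Nat → Int → Int → Int → Int → Int
  | 0, _, _, _, runs => runs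
  | n+1, i, hi, bs, runs =>
    if i < hi then
      let j := min (i + bs) hi
      let runs := runs + 1
      let runs := if 0 < PySem.List.pyGetD pf j 0 - PySem.List.pyGetD pf i 0 then
          runs + f i j (PySem.Int.floordiv bs 2)
        else runs
      pvLoopB f pf n j hi bs runs
    else runs

-- Source B's `count(lo, hi, bs)` (same fuel discipline as the A-port)
def pvCountB (pf : List Int) : Nat → Int → Int → Int → Int
  | 0, _, _, _ => 0
  | fuel+1, lo, hi, bs =>
    if bs = 1 then hi - lo
    else pvLoopB (pvCountB pf fuel) pf (hi - lo).toNat lo hi bs 0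

def get_num_of_runs_alt (test_list : List Bool) (batch_size : Int) : Int :=
  if batch_size = 1 then (test_list.length : Int)
  else if batch_size < 1 then 0
  else pvCountB (0 :: pvPrefixFalse test_list 0) (batch_size.toNat + 1)
        0 (test_list.length : Int) batch_size

-- ===== PRECONDITION & SPEC =====
-- Pre_ excludes only batch_size = 0, where A raises ValueError (range() with step 0).
def Pre_get_num_of_runs (test_list : List Bool) (batch_size : Int) : Prop := batch_size ≠ 0
instance (test_list : List Bool) (batch_size : Int) : Decidable (Pre_get_num_of_runs test_list batch_size) := by
  unfold Pre_get_num_of_runs; infer_instance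

def pvWitness_get_num_of_runs : List Bool × Int := ([true, false, true], 2)


def Spec_get_num_of_runs (test_list : List Bool) (batch_size : Int) (out : Int) : Prop :=
  out = get_num_of_runs_alt test_list batch_size
instance (test_list : List Bool) (batch_size : Int) (out : Int) : Decidable (Spec_get_num_of_runs test_list batch_size out) := by
  unfold Spec_get_num_of_runs; infer_instance

-- ===== CLAIM (what is proved, stated in full; the proofs are below) =====
def Claim_equal_get_num_of_runs : Prop := ∀ (test_list : List Bool) (batch_size : Int), Dom_get_num_of_runs test_list batch_size → Pre_get_num_of_runs test_list batch_size → Spec_get_num_of_runs test_list batch_size (get_num_of_runs test_list batch_size)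


-- ===== LEMMAS AND PROOFS =====

-- proof-side shorthand: the prefix table B builds
def pvPF (l : List Bool) : List Int := 0 :: pvPrefixFalse l 0

-- the contribution of one chunk in A's loop
def pvTerm (fuel : Nat) (u : List Bool) (bs i : Int) : Int :=
  1 + (if false ∈ (u.drop i.toNat).take bs.toNat then
        pvGoA fuel ((u.drop i.toNat).take bs.toNat) (PySem.Int.truncdiv bs 2) else 0)

-- int(bs/2) and bs // 2 agree on nonnegative bs
theorem pv_div_eq (bs : Int) (h : 0 ≤ bs) :
    PySem.Int.truncdiv bs 2 = PySem.Int.floordiv bs 2 := by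
  rw [PySem.Int.floordiv_eq_ediv_of_pos (by norm_num)]
  show bs.tdiv 2 = bs / 2
  rw [Int.tdiv_eq_ediv]
  simp [h]

theorem pv_range_pos_nil {a b s : Int} (hs : 0 < s) (h : b ≤ a) :
    PySem.List.pyRange a b s = [] := by
  rw [PySem.List.pyRange_of_pos a b hs, if_neg (by omega)]
  simp

theorem pv_range_neg_nil {a b s : Int} (hs : s < 0) (h : a ≤ b) :
    PySem.List.pyRange a b s = [] := by
  simp only [PySem.List.pyRange]
  rw [if_neg (by omega : ¬ s = 0), if_neg (by omega : ¬ 0 < s), if_neg (by omega : ¬ b < a)]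
  simp

theorem pv_range_cons {n s : Int} (hn : 0 < n) (hs : 0 < s) :
    PySem.List.pyRange 0 n s = 0 :: (PySem.List.pyRange 0 (n - s) s).map (· + s) := by
  rw [PySem.List.pyRange_of_pos 0 n hs, PySem.List.pyRange_of_pos 0 (n - s) hs]
  have hcount : (if (0:Int) < n then ((n - 0 + s - 1) / s).toNat else 0)
      = (if (0:Int) < n - s then ((n - s - 0 + s - 1) / s).toNat else 0) + 1 := by
    rw [if_pos hn]
    by_cases hns : (0:Int) < n - s
    · rw [if_pos hns]
      have e1 : n - 0 + s - 1 = (n - 1) + 1 * s := by ring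
      have e2 : n - s - 0 + s - 1 = n - 1 := by ring
      have e3 : ((n - 1) + 1 * s) / s = (n - 1) / s + 1 := by
        rw [Int.add_mul_ediv_right _ _ (by omega : s ≠ 0)]
      have e4 : 0 ≤ (n - 1) / s := Int.ediv_nonneg (by omega) (by omega)
      rw [e1, e2, e3]
      omega
    · rw [if_neg hns]
      have h1 : 1 ≤ (n - 0 + s - 1) / s := by
        rw [Int.le_ediv_iff_mul_le hs]; omega
      have h2 : (n - 0 + s - 1) / s < 2 := by
        rw [Int.ediv_lt_iff_lt_mul hs]; omega
      omega
  rw [hcount, List.range_succ_eq_map, List.map_cons, List.map_map, List.map_map]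
  refine congrArg₂ _ (by norm_num) ?_
  apply List.map_congr_left
  intro k _
  simp only [Function.comp_apply]
  push_cast
  ring

theorem pv_portion (u : List Bool) (bs i : Int) (h0 : 0 ≤ i) (hbs : 0 < bs) :
    (if i + bs > (u.length : Int) then PySem.List.slice u (some i) none
     else PySem.List.slice u (some i) (some (i + bs)))
      = (u.drop i.toNat).take bs.toNat := by
  by_cases h : i + bs > (u.length : Int)
  · rw [if_pos h, PySem.List.slice_from u h0, List.take_of_length_le]
    simp only [List.length_drop]
    omega
  · rw [if_neg h, PySem.List.slice_toNat u h0 (by omega)]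
    congr 1
    omega

theorem pv_A_else (fuel : Nat) (u : List Bool) (bs : Int) (h2 : 2 ≤ bs) :
    pvGoA (fuel+1) u bs
      = ((PySem.List.pyRange 0 (u.length : Int) bs).map (pvTerm fuel u bs)).sum := by
  rw [pvGoA, if_neg (by omega : ¬ bs = 1)]
  rw [PySem.List.foldl_congr_mem _ _ (fun acc i => acc + pvTerm fuel u bs i) 0 ?_]
  · rw [PySem.List.foldl_add]; simp
  · intro acc x hx
    have hx0 : 0 ≤ x := ((PySem.List.mem_pyRange_iff_of_pos (by omega) x).1 hx).1
    simp only [pv_portion u bs x hx0 (by omega), pvTerm]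
    split <;> ring

theorem pv_sum_chunk (fuel : Nat) (u : List Bool) (bs : Int) (h2 : 2 ≤ bs) (hu : u ≠ []) :
    ((PySem.List.pyRange 0 (u.length : Int) bs).map (pvTerm fuel u bs)).sum
      = pvTerm fuel u bs 0
        + ((PySem.List.pyRange 0 ((u.drop bs.toNat).length : Int) bs).map
            (pvTerm fuel (u.drop bs.toNat) bs)).sum := by
  have hlen : 0 < (u.length : Int) := by
    have := List.length_pos_iff.2 hu
    exact_mod_cast this
  rw [pv_range_cons hlen (by omega), List.map_cons, List.sum_cons, List.map_map]
  congr 1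
  have hrange : PySem.List.pyRange 0 ((u.length : Int) - bs) bs
      = PySem.List.pyRange 0 ((u.drop bs.toNat).length : Int) bs := by
    by_cases hb : bs ≤ (u.length : Int)
    · congr 1
      simp only [List.length_drop]
      omega
    · rw [pv_range_pos_nil (by omega) (by omega), pv_range_pos_nil (by omega)]
      simp only [List.length_drop]
      omega
  rw [← hrange]
  apply congrArg
  apply List.map_congr_left
  intro i hi
  have hi0 : 0 ≤ i := ((PySem.List.mem_pyRange_iff_of_pos (by omega) i).1 hi).1
  simp only [Function.comp_apply, pvTerm, List.drop_drop]
  have he : (i + bs).toNat = bs.toNat + i.toNat := by omega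
  rw [he]

theorem pv_loopB_acc (f : Int → Int → Int → Int) (pf : List Int) :
    ∀ (n : Nat) (i hi bs acc : Int),
      pvLoopB f pf n i hi bs acc = acc + pvLoopB f pf n i hi bs 0 := by
  intro n
  induction n with
  | zero => intro i hi bs acc; simp [pvLoopB]
  | succ n IH =>
    intro i hi bs acc
    rw [pvLoopB, pvLoopB]
    by_cases h : i < hi
    · simp only [if_pos h]
      by_cases hc : 0 < PySem.List.pyGetD pf (min (i + bs) hi) 0 - PySem.List.pyGetD pf i 0
      · simp only [if_pos hc]
        rw [IH _ _ _ (acc + 1 + _), IH _ _ _ (0 + 1 + _)]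
        ring
      · simp only [if_neg hc]
        rw [IH _ _ _ (acc + 1), IH _ _ _ ((0:Int) + 1)]
        ring
    · simp [if_neg h]

theorem pv_pf_get (l : List Bool) : ∀ (c : Int) (k : Nat), k ≤ l.length →
    (c :: pvPrefixFalse l c).getD k 0 = c + ((l.take k).count false : Int) := by
  induction l with
  | nil =>
    intro c k hk
    have : k = 0 := by simpa using hk
    subst this
    simp
  | cons x xs IH =>
    intro c k hk
    cases k with
    | zero => simp
    | succ k =>
      have hstep : pvPrefixFalse (x :: xs) c
          = (c + (if x then 0 else 1)) :: pvPrefixFalse xs (c + (if x then 0 else 1)) := by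
        simp [pvPrefixFalse]
      rw [hstep]
      have : ((c : Int) :: (c + (if x then 0 else 1)) :: pvPrefixFalse xs (c + (if x then 0 else 1))).getD (k+1) 0
          = ((c + (if x then 0 else 1)) :: pvPrefixFalse xs (c + (if x then 0 else 1))).getD k 0 := by
        simp
      rw [this, IH _ k (by simpa using hk)]
      rw [List.take_succ_cons, List.count_cons]
      cases x
      · simp; ring
      · simp

theorem pv_mem_iff (l : List Bool) (lo j : Int) (h0 : 0 ≤ lo) (hlj : lo ≤ j)
    (hj : j ≤ (l.length : Int)) :
    (0 < PySem.List.pyGetD (pvPF l) j 0 - PySem.List.pyGetD (pvPF l) lo 0)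
      ↔ false ∈ (l.drop lo.toNat).take (j.toNat - lo.toNat) := by
  unfold pvPF
  rw [PySem.List.pyGetD_of_nonneg _ _ (by omega), PySem.List.pyGetD_of_nonneg _ _ h0]
  rw [pv_pf_get l 0 j.toNat (by omega), pv_pf_get l 0 lo.toNat (by omega)]
  have hsplit : l.take j.toNat = l.take lo.toNat ++ (l.drop lo.toNat).take (j.toNat - lo.toNat) := by
    have h : j.toNat = lo.toNat + (j.toNat - lo.toNat) := by omega
    conv_lhs => rw [h]
    rw [List.take_add]
  rw [hsplit, List.count_append]
  rw [← List.count_pos_iff (a := false) (l := (l.drop lo.toNat).take (j.toNat - lo.toNat))]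
  push_cast
  omega

theorem pv_loop_eq : ∀ (n fuel : Nat) (l : List Bool) (bs : Int), 2 ≤ bs →
    (∀ lo' hi', 0 ≤ lo' → lo' ≤ hi' → hi' ≤ (l.length : Int) →
      pvGoA fuel ((l.drop lo'.toNat).take (hi'.toNat - lo'.toNat)) (PySem.Int.truncdiv bs 2)
        = pvCountB (pvPF l) fuel lo' hi' (PySem.Int.truncdiv bs 2)) →
    ∀ lo hi, 0 ≤ lo → lo ≤ hi → hi ≤ (l.length : Int) → (hi - lo).toNat ≤ n →
    ((PySem.List.pyRange 0 ((((l.drop lo.toNat).take (hi.toNat - lo.toNat)).length : Nat) : Int) bs).map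
        (pvTerm fuel ((l.drop lo.toNat).take (hi.toNat - lo.toNat)) bs)).sum
      = pvLoopB (pvCountB (pvPF l) fuel) (pvPF l) n lo hi bs 0 := by
  intro n
  induction n with
  | zero =>
    intro fuel l bs h2 hrec lo hi h0 hlh hhl hn
    have hlo : lo = hi := by omega
    subst hlo
    have hz : lo.toNat - lo.toNat = 0 := by omega
    rw [hz]
    simp only [List.take_zero, List.length_nil, Nat.cast_zero]
    rw [pv_range_pos_nil (by omega) (by omega)]
    simp [pvLoopB]
  | succ n IH =>
    intro fuel l bs h2 hrec lo hi h0 hlh hhl hn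
    by_cases hlt : lo < hi
    · set u := (l.drop lo.toNat).take (hi.toNat - lo.toNat) with hu
      have hulen : u.length = hi.toNat - lo.toNat := by
        rw [hu]
        simp only [List.length_take, List.length_drop]
        omega
      have hune : u ≠ [] := by
        intro hnil
        rw [hnil] at hulen
        simp at hulen
        omega
      rw [pv_sum_chunk fuel u bs h2 hune]
      -- the head chunk
      set j := min (lo + bs) hi with hj
      have hjle : j ≤ hi := min_le_right _ _
      have hjub : j ≤ lo + bs := min_le_left _ _
      have hjor : j = lo + bs ∨ j = hi := by
        rcases le_total (lo + bs) hi with h | h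
        · left; rw [hj, min_eq_left h]
        · right; rw [hj, min_eq_right h]
      have hjlb : lo + 1 ≤ j := by omega
      have hchunk : (u.drop (0:Int).toNat).take bs.toNat
          = (l.drop lo.toNat).take (j.toNat - lo.toNat) := by
        rw [hu]
        simp only [Int.toNat_zero, List.drop_zero, List.take_take]
        congr 1
        omega
      -- the tail of the list
      have htail : u.drop bs.toNat = (l.drop j.toNat).take (hi.toNat - j.toNat) := by
        rw [hu, List.drop_take, List.drop_drop]
        by_cases hcase : lo + bs ≤ hi
        · have e1 : hi.toNat - lo.toNat - bs.toNat = hi.toNat - j.toNat := by omega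
          have e2 : lo.toNat + bs.toNat = j.toNat := by omega
          rw [e1, e2]
        · have e1 : hi.toNat - lo.toNat - bs.toNat = 0 := by omega
          have e2 : hi.toNat - j.toNat = 0 := by omega
          rw [e1, e2]
          simp
      -- unfold one step of B's loop
      rw [pvLoopB, if_pos hlt]
      simp only [← hj]
      rw [pv_loopB_acc]
      rw [← IH fuel l bs h2 hrec j hi (by omega) hjle hhl (by omega)]
      rw [htail]
      congr 1
      -- head terms agree
      unfold pvTerm
      rw [hchunk]
      rw [← pv_div_eq bs (by omega)]
      by_cases hmem : false ∈ (l.drop lo.toNat).take (j.toNat - lo.toNat)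
      · rw [if_pos hmem, if_pos ((pv_mem_iff l lo j h0 (by omega) (by omega)).2 hmem)]
        rw [hrec lo j h0 (by omega) (by omega)]
        ring
      · rw [if_neg hmem, if_neg (fun hc => hmem ((pv_mem_iff l lo j h0 (by omega) (by omega)).1 hc))]
        ring
    · have hlo : lo = hi := by omega
      subst hlo
      have hz : lo.toNat - lo.toNat = 0 := by omega
      rw [hz]
      simp only [List.take_zero, List.length_nil, Nat.cast_zero]
      rw [pv_range_pos_nil (by omega) (by omega)]
      rw [pvLoopB, if_neg hlt]
      simp

theorem pv_main : ∀ (fuel : Nat) (l : List Bool) (lo hi bs : Int),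
    0 ≤ lo → lo ≤ hi → hi ≤ (l.length : Int) → 1 ≤ bs → bs.toNat < fuel →
    pvGoA fuel ((l.drop lo.toNat).take (hi.toNat - lo.toNat)) bs
      = pvCountB (pvPF l) fuel lo hi bs := by
  intro fuel
  induction fuel with
  | zero => intro l lo hi bs _ _ _ hbs hf; omega
  | succ fuel IH =>
    intro l lo hi bs h0 hlh hhl hbs hf
    by_cases hb1 : bs = 1
    · subst hb1
      rw [pvGoA, if_pos rfl, pvCountB, if_pos rfl]
      simp only [List.length_take, List.length_drop]
      omega
    · have h2 : 2 ≤ bs := by omega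
      have hdiv : PySem.Int.truncdiv bs 2 = bs / 2 := by
        show bs.tdiv 2 = bs / 2
        rw [Int.tdiv_eq_ediv]
        simp [show (0:Int) ≤ bs by omega]
      have hd1 : 1 ≤ bs / 2 := by
        rw [Int.le_ediv_iff_mul_le (by norm_num)]; omega
      have hd2 : bs / 2 < bs := by
        rw [Int.ediv_lt_iff_lt_mul (by norm_num)]; omega
      rw [pv_A_else fuel _ bs h2, pvCountB, if_neg hb1]
      exact pv_loop_eq (hi - lo).toNat fuel l bs h2
        (fun lo' hi' a b c => by
          rw [hdiv]
          exact IH l lo' hi' (bs / 2) a b c hd1 (by omega))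
        lo hi h0 hlh hhl le_rfl

theorem pv_final : ∀ (l : List Bool) (bs : Int), bs ≠ 0 → get_num_of_runs l bs = get_num_of_runs_alt l bs := by
  intro l bs hpre
  by_cases h1 : bs = 1
  · subst h1
    simp [get_num_of_runs, get_num_of_runs_alt, pvGoA]
  · by_cases h2 : bs < 1
    · have hneg : bs < 0 := by omega
      have ht : bs.toNat = 0 := by omega
      rw [get_num_of_runs, ht, get_num_of_runs_alt, if_neg h1, if_pos h2]
      rw [pvGoA, if_neg h1, pv_range_neg_nil hneg (by positivity)]
      simp
    · have hbs : 1 ≤ bs := by omega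
      have h := pv_main (bs.toNat + 1) l 0 (l.length : Int) bs le_rfl (by positivity) le_rfl hbs (by omega)
      have e : (l.drop ((0:Int)).toNat).take (((l.length : Int)).toNat - ((0:Int)).toNat) = l := by
        simp
      rw [e] at h
      unfold pvPF at h
      rw [get_num_of_runs, get_num_of_runs_alt, if_neg h1, if_neg (by omega : ¬ bs < 1)]
      exact h

-- ===== VERDICT (by name: the statement is the Claim_ definition above) =====
theorem get_num_of_runs_spec : Claim_equal_get_num_of_runs := by
  intro test_list batch_size _ hpre
  unfold Spec_get_num_of_runs
  exact pv_final test_list batch_size hpre
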